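-- pv_equiv track=rewrite | github.com/QuangPhung15/CompetitiveProgramming | CSES/Introductory Problems/Permutations.py | solve
-- ===== SOURCE A (Python) =====
-- def solve(n):
-- 	res = []
--
-- 	if (n == 3 or n == 2):
-- 		return "NO SOLUTION"
--
-- 	for i in range(2, n + 1, 2):
-- 		res.append(i)
--
-- 	for i in range(1, n + 1, 2):
-- 		res.append(i)
--
-- 	return res
-- ===== SOURCE B (Python) =====
-- def solve(n):
--     if n == 3 or n == 2:
--         return "NO SOLUTION"
--     return sorted(range(1, n + 1), key=lambda x: x % 2)
-- ===== Notes on version B (the rewrite author's own statement) =====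
-- stated objective: idiomatic
-- what changed: Replaces the two explicit append loops (evens then odds) by a single stable sort of range(1, n+1) keyed by parity; stability makes evens (key 0) precede odds (key 1), each ascending.
-- outside the precondition, e.g. on solve(2): A returns 'NO SOLUTION', B returns 'NO SOLUTION'; on solve(3): A returns 'NO SOLUTION', B returns 'NO SOLUTION'
import Mathlib
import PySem

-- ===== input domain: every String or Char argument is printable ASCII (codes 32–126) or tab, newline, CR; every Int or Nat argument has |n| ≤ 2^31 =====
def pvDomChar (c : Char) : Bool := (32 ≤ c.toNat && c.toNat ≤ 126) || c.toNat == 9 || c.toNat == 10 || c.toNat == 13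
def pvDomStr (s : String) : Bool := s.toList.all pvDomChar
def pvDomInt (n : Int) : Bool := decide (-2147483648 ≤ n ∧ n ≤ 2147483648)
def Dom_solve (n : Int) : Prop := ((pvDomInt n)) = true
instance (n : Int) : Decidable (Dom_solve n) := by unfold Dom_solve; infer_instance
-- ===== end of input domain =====

-- B replaces A's two append loops by one stable parity-keyed sort (idiomatic; same result).
-- For n = 2 or 3 the Python returns the STRING "NO SOLUTION" (not a list of ints): those
-- inputs are excluded by Pre_solve; the ports return [] there (value not claimed).

-- ===== PORT A =====
def solve (n : Int) : List Int :=
  if n == 3 || n == 2 then []  -- Python: return "NO SOLUTION" (a string); excluded by Pre_solve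
  else
    let res := (PySem.List.pyRange 2 (n + 1) 2).foldl (fun acc i => acc ++ [i]) []
    (PySem.List.pyRange 1 (n + 1) 2).foldl (fun acc i => acc ++ [i]) res

-- ===== PORT B =====
def solve_alt (n : Int) : List Int :=
  if n == 3 || n == 2 then []  -- Python: return "NO SOLUTION" (a string); excluded by Pre_solve
  else PySem.List.sorted (PySem.List.pyRange 1 (n + 1) 1) (fun x => PySem.Int.mod x 2) false

-- ===== PRECONDITION & SPEC =====
-- Pre_ excludes n = 2 and n = 3, where the Python returns the string "NO SOLUTION",
-- which is not a value of the declared return type List Int.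
def Pre_solve (n : Int) : Prop := n ≠ 2 ∧ n ≠ 3
instance (n : Int) : Decidable (Pre_solve n) := by unfold Pre_solve; infer_instance
def pvWitness_solve : Int := 7
def Spec_solve (n : Int) (out : List Int) : Prop := out = solve_alt n
instance (n : Int) (out : List Int) : Decidable (Spec_solve n out) := by unfold Spec_solve; infer_instance

-- ===== CLAIM (what is proved, stated in full; the proofs are below) =====
def Claim_equal_solve : Prop := ∀ (n : Int), Dom_solve n → Pre_solve n → Spec_solve n (solve n)

-- ===== LEMMAS AND PROOFS =====

-- Python's x % 2 equals Lean's Int.emod for the positive divisor 2.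
lemma pymod2 (x : Int) : PySem.Int.mod x 2 = x % 2 := by
  simp only [PySem.Int.mod]
  exact Int.fmod_eq_emod_of_nonneg x (by norm_num)

-- appending-fold is concatenation
lemma foldl_app (xs : List Int) (acc : List Int) :
    xs.foldl (fun a i => a ++ [i]) acc = acc ++ xs := by
  induction xs generalizing acc with
  | nil => simp
  | cons x xs ih => simp [List.foldl, ih, List.append_assoc]

-- every element of a step-2 range is a + 2k
lemma mem_pr2 {a b x : Int} (h : x ∈ PySem.List.pyRange a b 2) : ∃ k : Nat, x = a + 2 * k := by
  rw [PySem.List.pyRange_of_pos a b (by norm_num)] at h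
  simp only [List.mem_map, List.mem_range] at h
  obtain ⟨k, _, hk⟩ := h
  exact ⟨k, hk.symm⟩

-- one more step of a step-2 range: it grows by [b] exactly when b has a's parity
lemma pr2_step (a b : Int) (hab : a ≤ b + 1) :
    PySem.List.pyRange a (b + 1) 2 =
      PySem.List.pyRange a b 2 ++ (if b % 2 = a % 2 then [b] else []) := by
  rw [PySem.List.pyRange_of_pos a (b + 1) (by norm_num),
      PySem.List.pyRange_of_pos a b (by norm_num)]
  by_cases hp : b % 2 = a % 2
  · have hc : (if a < b + 1 then ((b + 1 - a + 2 - 1) / 2).toNat else 0) =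
        (if a < b then ((b - a + 2 - 1) / 2).toNat else 0) + 1 := by
      split_ifs <;> omega
    have hv : (a + if a < b then 2 * max ((b - a + 2 - 1) / 2) 0 else 0) = b := by
      split_ifs <;> omega
    rw [hc, List.range_succ, List.map_append]
    simp [hp, hv]
  · have hc : (if a < b + 1 then ((b + 1 - a + 2 - 1) / 2).toNat else 0) =
        (if a < b then ((b - a + 2 - 1) / 2).toNat else 0) := by
      split_ifs <;> omega
    rw [hc]; simp [hp]

-- stable insertion of an even element goes at the end of the even block
lemma insert_even (x : Int) (E O : List Int) (hx : x % 2 = 0)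
    (hE : ∀ e ∈ E, e % 2 = 0) (hO : ∀ o ∈ O, o % 2 = 1) :
    PySem.List.insertBy (fun a b => decide (PySem.Int.mod a 2 < PySem.Int.mod b 2)) x (E ++ O)
      = E ++ x :: O := by
  induction E with
  | nil =>
    cases O with
    | nil => simp [PySem.List.insertBy]
    | cons o os =>
      have ho := hO o (by simp)
      simp [PySem.List.insertBy, hx, ho]
  | cons e E ih =>
    have he := hE e (by simp)
    have hr := ih (fun e' h => hE e' (by simp [h]))
    simp only [pymod2] at hr
    simp only [List.cons_append, PySem.List.insertBy, pymod2]
    have : decide (x % 2 < e % 2) = false := by simp; omega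
    rw [this]
    simp only [Bool.false_eq_true, if_false, hr]

-- the main invariant: the stable parity sort of [1..m] is evens ++ odds
lemma sort_parity (m : Nat) :
    PySem.List.sorted (PySem.List.pyRange 1 ((m : Int) + 1) 1) (fun x => PySem.Int.mod x 2) false
      = PySem.List.pyRange 2 ((m : Int) + 1) 2 ++ PySem.List.pyRange 1 ((m : Int) + 1) 2 := by
  induction m with
  | zero => decide
  | succ m ih =>
    rw [PySem.List.sorted_eq_foldl_insertBy] at ih ⊢
    have hcast : (((m + 1 : Nat) : Int) + 1) = ((m : Int) + 1) + 1 := by push_cast; ring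
    rw [hcast, PySem.List.pyRange_one_succ_right (by omega), List.foldl_append, ih]
    set b : Int := (m : Int) + 1 with hb
    have hEmem : ∀ e ∈ PySem.List.pyRange 2 b 2, e % 2 = 0 := by
      intro e he; obtain ⟨k, hk⟩ := mem_pr2 he; omega
    have hOmem : ∀ o ∈ PySem.List.pyRange 1 b 2, o % 2 = 1 := by
      intro o ho; obtain ⟨k, hk⟩ := mem_pr2 ho; omega
    by_cases hpar : b % 2 = 0
    · -- b even: insert at the end of the even block; odd range unchanged
      rw [List.foldl_cons, List.foldl_nil,
          insert_even b _ _ hpar hEmem hOmem,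
          pr2_step 2 b (by omega), pr2_step 1 b (by omega)]
      have h2 : b % 2 = (2 : Int) % 2 := by omega
      have h1 : ¬ b % 2 = (1 : Int) % 2 := by omega
      simp [h2]
    · -- b odd: its key 1 is maximal, so it is appended at the very end
      rw [List.foldl_cons, List.foldl_nil,
          PySem.List.insertBy_of_forall_not_before _ _ _ ?_,
          pr2_step 2 b (by omega), pr2_step 1 b (by omega)]
      · have h2 : ¬ b % 2 = (2 : Int) % 2 := by omega
        have h1 : b % 2 = (1 : Int) % 2 := by omega
        simp [h1]
      · intro y hy
        rcases List.mem_append.mp hy with h | h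
        · have := hEmem y h; simp; omega
        · have := hOmem y h; simp; omega

-- ===== VERDICT (by name: the statement is the Claim_ definition above) =====
theorem solve_spec : Claim_equal_solve := by
  intro n _ hpre
  unfold Spec_solve solve solve_alt
  have hif : (n == 3 || n == 2) = false := by
    simp only [Bool.or_eq_false_iff, beq_eq_false_iff_ne, ne_eq]
    exact ⟨hpre.2, hpre.1⟩
  rw [hif]
  simp only [Bool.false_eq_true, if_false]
  rw [foldl_app, foldl_app, List.nil_append]
  by_cases hn : 0 ≤ n
  · obtain ⟨m, hm⟩ := Int.eq_ofNat_of_zero_le hn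
    subst hm
    exact (sort_parity m).symm
  · have h1 : PySem.List.pyRange 1 (n + 1) 1 = [] :=
      PySem.List.pyRange_one_eq_nil (by omega)
    have h2 : PySem.List.pyRange 2 (n + 1) 2 = [] := by
      rw [PySem.List.pyRange_of_pos 2 (n + 1) (by norm_num)]
      have : ¬ (2 : Int) < n + 1 := by omega
      simp [this]
    have h3 : PySem.List.pyRange 1 (n + 1) 2 = [] := by
      rw [PySem.List.pyRange_of_pos 1 (n + 1) (by norm_num)]
      have : ¬ (1 : Int) < n + 1 := by omega
      simp [this]
    rw [h1, h2, h3]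
    simp [PySem.List.sorted]
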